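-- pv_equiv track=rewrite | github.com/Bhaskar-Kurasala/pae_platform | backend/app/core/sentry.py | _redact_long_qs_values
-- ===== SOURCE A (Python) =====
-- def _redact_long_qs_values(qs: str) -> str:
--     """Replace any `key=value` pair where the value is > 32 chars."""
--     parts: list[str] = []
--     for kv in qs.split("&"):
--         if "=" not in kv:
--             parts.append(kv)
--             continue
--         key, _, value = kv.partition("=")
--         if len(value) > 32:
--             parts.append(f"{key}=[redacted]")
--         else:
--             parts.append(kv)
--     return "&".join(parts)
-- ===== SOURCE B (Python) =====
-- def _redact_long_qs_values(qs: str) -> str: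
--     """Replace any `key=value` pair where the value is > 32 chars."""
--     out = ""
--     while True:
--         head, amp, qs = qs.partition("&")
--         key, eq, value = head.partition("=")
--         out += key + "=[redacted]" if eq and len(value) > 32 else head
--         if not amp:
--             return out
--         out += "&"
-- ===== Notes on version B (the rewrite author's own statement) =====
-- stated objective: alternative
-- what changed: Replaces split('&') + per-segment list accumulation + '&'.join with a single partition('&')-driven loop that peels one segment at a time and appends directly to the output string, never materialising a list of parts.
import Mathlib
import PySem

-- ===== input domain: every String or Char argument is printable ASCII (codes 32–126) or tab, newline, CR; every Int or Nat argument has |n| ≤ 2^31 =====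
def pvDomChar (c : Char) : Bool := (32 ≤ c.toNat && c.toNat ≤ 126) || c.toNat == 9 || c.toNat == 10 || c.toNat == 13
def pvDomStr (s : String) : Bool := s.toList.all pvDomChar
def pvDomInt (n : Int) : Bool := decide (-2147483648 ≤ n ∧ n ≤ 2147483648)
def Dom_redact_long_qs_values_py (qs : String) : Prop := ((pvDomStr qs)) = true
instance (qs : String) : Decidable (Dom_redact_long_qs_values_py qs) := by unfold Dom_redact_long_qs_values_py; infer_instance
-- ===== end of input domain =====

-- B replaces A's split('&') + list of parts + '&'.join with one partition('&')-driven loop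
-- that appends each (possibly redacted) segment directly to the output; same return value.

-- ===== PORT A =====
-- hand-port of str.partition(sep) for a single-character sep c: exact — Python returns
-- (text before the first c, c-or-empty, text after the first c); we port the three components.
def pvPartBefore (c : Char) (s : List Char) : List Char := s.takeWhile (· ≠ c)
def pvPartSepRest (c : Char) (s : List Char) : List Char := s.dropWhile (· ≠ c)
def pvPartAfter (c : Char) (s : List Char) : List Char := (s.dropWhile (· ≠ c)).tail

def redact_long_qs_values_py (qs : String) : String :=
  let parts : List (List Char) :=
    (PySem.Chars.splitOn qs.toList ['&']).foldl (fun parts kv =>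
      if PySem.Chars.isIn ['='] kv = false then
        parts ++ [kv]
      else
        let key := pvPartBefore '=' kv
        let value := pvPartAfter '=' kv
        if value.length > 32 then parts ++ [key ++ "=[redacted]".toList]
        else parts ++ [kv]) []
  String.ofList (PySem.Chars.join ['&'] parts)

-- ===== PORT B =====
-- one loop iteration of Source B's while-loop: fix the head segment, append, continue on the tail
def redactAltSeg (head : List Char) : List Char :=
  let key := pvPartBefore '=' head
  let eq := pvPartSepRest '=' head
  let value := pvPartAfter '=' head
  if eq ≠ [] ∧ value.length > 32 then key ++ "=[redacted]".toList else head

def redactAltGo (l out : List Char) : List Char :=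
  let head := pvPartBefore '&' l
  let amp := pvPartSepRest '&' l
  let out' := out ++ redactAltSeg head
  if h : amp = [] then out'
  else redactAltGo (pvPartAfter '&' l) (out' ++ ['&'])
termination_by l.length
decreasing_by
  have h1 : (pvPartSepRest '&' l).length ≤ l.length := by
    simpa [pvPartSepRest] using (List.dropWhile_sublist (l := l) (p := (· ≠ '&'))).length_le
  have h2 : 0 < (pvPartSepRest '&' l).length := List.length_pos_of_ne_nil h
  have h3 : (pvPartSepRest '&' l).tail.length = (pvPartSepRest '&' l).length - 1 :=
    List.length_tail
  simp only [pvPartAfter, pvPartSepRest] at *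
  omega

def redact_long_qs_values_py_alt (qs : String) : String :=
  String.ofList (redactAltGo qs.toList [])

-- ===== PRECONDITION & SPEC =====
def Spec_redact_long_qs_values_py (qs : String) (out : String) : Prop := out = redact_long_qs_values_py_alt qs
instance (qs : String) (out : String) : Decidable (Spec_redact_long_qs_values_py qs out) := by unfold Spec_redact_long_qs_values_py; infer_instance

-- ===== CLAIM (what is proved, stated in full; the proofs are below) =====
def Claim_equal_redact_long_qs_values_py : Prop := ∀ (qs : String), Dom_redact_long_qs_values_py qs → Spec_redact_long_qs_values_py qs (redact_long_qs_values_py qs)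

-- ===== LEMMAS AND PROOFS =====

-- structural model of qs.split("&") (single-character separator)
def mySplit (l : List Char) : List (List Char) :=
  if h : '&' ∈ l then
    l.takeWhile (· ≠ '&') :: mySplit ((l.dropWhile (· ≠ '&')).tail)
  else [l]
termination_by l.length
decreasing_by
  have h1 : (l.dropWhile (· ≠ '&')).length ≤ l.length :=
    (List.dropWhile_sublist (l := l) (p := (· ≠ '&'))).length_le
  have h2 : l.dropWhile (· ≠ '&') ≠ [] := by
    intro hnil
    have := (List.dropWhile_eq_nil_iff).1 hnil '&' h
    simp at this
  have h3 := List.length_pos_of_ne_nil h2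
  simp only [List.length_tail]
  omega

lemma mySplit_ne_nil (l : List Char) : mySplit l ≠ [] := by
  unfold mySplit; split <;> simp

-- the fixed segment function A applies to each piece of the split
def fixSeg (kv : List Char) : List Char :=
  if PySem.Chars.isIn ['='] kv = false then kv
  else if (pvPartAfter '=' kv).length > 32 then pvPartBefore '=' kv ++ "=[redacted]".toList
  else kv

lemma isIn_singleton (c : Char) (l : List Char) :
    PySem.Chars.isIn [c] l = true ↔ c ∈ l := by
  rw [PySem.Chars.isIn_iff_infix]
  constructor
  · intro h; exact (List.singleton_sublist).1 h.sublist
  · intro h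
    obtain ⟨s, t, rfl⟩ := List.append_of_mem h
    exact ⟨s, t, by simp⟩

-- go-invariant for PySem.Chars.splitOn with separator ['&']
lemma splitOn_go_eq (fuel : Nat) (l cur : List Char) (acc : List (List Char)) (hf : l.length < fuel) :
    PySem.Chars.splitOn.go ['&'] fuel l cur acc =
      acc.reverse ++ (mySplit l).modifyHead (cur.reverse ++ ·) := by
  induction fuel generalizing l cur acc with
  | zero => omega
  | succ fuel ih =>
    cases l with
    | nil =>
      unfold PySem.Chars.splitOn.go mySplit
      simp
    | cons c rest =>
      by_cases hc : c = '&'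
      · subst hc
        unfold PySem.Chars.splitOn.go
        rw [if_pos (by simp [List.isPrefixOf])]
        rw [show List.drop (['&'] : List Char).length ('&' :: rest) = rest from rfl]
        rw [ih rest [] (cur.reverse :: acc) (by simp at hf ⊢; omega)]
        conv_rhs => rw [mySplit]
        rw [dif_pos (List.mem_cons_self)]
        simp [List.takeWhile, List.dropWhile, List.modifyHead]
        cases hms : mySplit rest <;> simp_all [List.modifyHead]
      · unfold PySem.Chars.splitOn.go
        rw [if_neg (by simp [List.isPrefixOf]; exact Ne.symm hc)]
        rw [ih rest (c :: cur) acc (by simp at hf ⊢; omega)]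
        have hdc : List.dropWhile (fun x => x ≠ '&') (c :: rest) = List.dropWhile (fun x => x ≠ '&') rest := by
          simp [hc]
        have htc : List.takeWhile (fun x => x ≠ '&') (c :: rest) = c :: List.takeWhile (fun x => x ≠ '&') rest := by
          simp [hc]
        conv_lhs => rw [mySplit]
        conv_rhs => rw [mySplit]
        by_cases hmem : '&' ∈ rest
        · have hm1 : '&' ∈ c :: rest := List.mem_cons_of_mem _ hmem
          rw [dif_pos hmem, dif_pos hm1, hdc, htc]
          simp [List.modifyHead]
        · have hm1 : ¬ '&' ∈ c :: rest := by
            simp [hmem]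
            exact fun hh => hc hh.symm
          rw [dif_neg hmem, dif_neg hm1]
          simp [List.modifyHead]

lemma splitOn_eq_mySplit (l : List Char) :
    PySem.Chars.splitOn l ['&'] = mySplit l := by
  have h := splitOn_go_eq (l.length + 1) l [] [] (by omega)
  simp only [List.reverse_nil, List.nil_append] at h
  unfold PySem.Chars.splitOn
  rw [h]
  cases hms : mySplit l <;> simp [List.modifyHead]

lemma foldl_fix (parts0 : List (List Char)) (xs : List (List Char)) :
    xs.foldl (fun parts kv =>
      if PySem.Chars.isIn ['='] kv = false then
        parts ++ [kv]
      else
        let key := pvPartBefore '=' kv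
        let value := pvPartAfter '=' kv
        if value.length > 32 then parts ++ [key ++ "=[redacted]".toList]
        else parts ++ [kv]) parts0 = parts0 ++ xs.map fixSeg := by
  induction xs generalizing parts0 with
  | nil => simp
  | cons x xs ih =>
    simp only [List.foldl_cons, List.map_cons]
    rw [ih]
    unfold fixSeg
    split_ifs <;> simp

lemma fixSeg_eq_redactAltSeg (kv : List Char) : fixSeg kv = redactAltSeg kv := by
  unfold fixSeg redactAltSeg
  have h : (PySem.Chars.isIn ['='] kv = false) ↔ pvPartSepRest '=' kv = [] := by
    rw [← Bool.not_eq_true, isIn_singleton]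
    simp only [pvPartSepRest, List.dropWhile_eq_nil_iff]
    constructor
    · intro hni x hx
      simp only [ne_eq, decide_eq_true_eq]
      intro hxe
      exact hni (hxe ▸ hx)
    · intro hall hmem
      have := hall '=' hmem
      simp at this
  by_cases he : pvPartSepRest '=' kv = []
  · rw [if_pos (h.2 he)]
    simp [he]
  · rw [if_neg (fun hf => he (h.1 hf))]
    simp only [he, ne_eq, not_false_iff, true_and]

lemma join_map_mySplit (l : List Char) (out : List Char) :
    out ++ PySem.Chars.join ['&'] ((mySplit l).map fixSeg) = redactAltGo l out := by
  induction l using mySplit.induct generalizing out with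
  | case1 l h ih =>
    have hamp : pvPartSepRest '&' l ≠ [] := by
      simp only [pvPartSepRest, ne_eq, List.dropWhile_eq_nil_iff]
      push Not
      exact ⟨'&', h, by simp⟩
    conv_lhs => rw [mySplit]
    rw [dif_pos h]
    obtain ⟨y, ys, hys⟩ := List.exists_cons_of_ne_nil (mySplit_ne_nil ((l.dropWhile (· ≠ '&')).tail))
    conv_rhs => rw [redactAltGo]
    rw [dif_neg hamp]
    rw [show pvPartAfter '&' l = (l.dropWhile (· ≠ '&')).tail from rfl, ← ih]
    rw [hys]
    simp only [List.map_cons, PySem.Chars.join_cons_cons, fixSeg_eq_redactAltSeg]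
    simp [pvPartBefore, List.append_assoc]
  | case2 l h =>
    have hamp : pvPartSepRest '&' l = [] := by
      simp only [pvPartSepRest, List.dropWhile_eq_nil_iff]
      intro x hx
      simp only [ne_eq, decide_eq_true_eq]
      intro hxe; exact h (hxe ▸ hx)
    have hhead : pvPartBefore '&' l = l := by
      simp only [pvPartBefore, List.takeWhile_eq_self_iff]
      intro x hx
      simp only [ne_eq, decide_eq_true_eq]
      intro hxe; exact h (hxe ▸ hx)
    conv_lhs => rw [mySplit]
    rw [dif_neg h]
    conv_rhs => rw [redactAltGo]
    rw [dif_pos hamp]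
    rw [List.map_singleton, PySem.Chars.join_singleton, hhead, fixSeg_eq_redactAltSeg]

-- ===== VERDICT (by name: the statement is the Claim_ definition above) =====
theorem redact_long_qs_values_py_spec : Claim_equal_redact_long_qs_values_py := by
  intro qs _
  unfold Spec_redact_long_qs_values_py redact_long_qs_values_py redact_long_qs_values_py_alt
  rw [splitOn_eq_mySplit, foldl_fix, List.nil_append]
  have hj := join_map_mySplit qs.toList []
  rw [List.nil_append] at hj
  show String.ofList (PySem.Chars.join ['&'] (List.map fixSeg (mySplit qs.toList))) =
    String.ofList (redactAltGo qs.toList [])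
  rw [hj]
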